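-- pv_equiv track=rewrite | github.com/kobejean/twitter-ml | tml/learning/word_embeddings/random_or_not_nn.py | sub_seqs_gen
-- ===== SOURCE A (Python) =====
-- def sub_seqs_gen(seqs_reader, vocab_size, seq_size):
--     """
--     DESCRIPTION:
--         generates sub sequences given the sequence reader
--
--     ARGUMENTS:
--         seqs_reader     A generator that produces sequences of word indices
--         vocab_size      The vocabulary size
--         seq_size        The size of the sub sequences
--     """
--     for seq in seqs_reader:
--         # make sure the sequence is long enough to make a sub sequence of size seq_size
--         if len(seq) >= seq_size:
--             # loop through sub sequences
--             for i in range(len(seq) - seq_size + 1):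
--                 sub_seq = seq[i : i + seq_size]
--                 assert len(sub_seq) == seq_size, "not len(sub_seq) == seq_size"
--                 # make sure all words are in vocabulary of size vocab_size before appending
--                 if all([wi < vocab_size for wi in sub_seq]):
--                     yield sub_seq
-- ===== SOURCE B (Python) =====
-- def sub_seqs_gen(seqs_reader, vocab_size, seq_size):
--     """
--     DESCRIPTION:
--         generates sub sequences given the sequence reader
--
--     Prefix-sum re-implementation: for each sequence, count the out-of-vocabulary
--     words once into a prefix-sum table, then a window is valid exactly when the
--     table shows no invalid word inside it (pre[i+seq_size] == pre[i]).
--     """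
--     for seq in seqs_reader:
--         n = len(seq)
--         if n >= seq_size:
--             pre = [0]
--             for w in seq:
--                 pre.append(pre[-1] + (0 if w < vocab_size else 1))
--             for i in range(n - seq_size + 1):
--                 if pre[i + seq_size] == pre[i]:
--                     yield seq[i : i + seq_size]
-- ===== Notes on version B (the rewrite author's own statement) =====
-- stated objective: alternative
-- what changed: B builds one prefix-sum table of out-of-vocabulary counts per sequence and validates each window by a single table comparison, replacing A's per-window all()-rescan of window elements.
-- outside the precondition, e.g. on sub_seqs_gen([], 0, -1): A returns [], B returns []
import Mathlib
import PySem

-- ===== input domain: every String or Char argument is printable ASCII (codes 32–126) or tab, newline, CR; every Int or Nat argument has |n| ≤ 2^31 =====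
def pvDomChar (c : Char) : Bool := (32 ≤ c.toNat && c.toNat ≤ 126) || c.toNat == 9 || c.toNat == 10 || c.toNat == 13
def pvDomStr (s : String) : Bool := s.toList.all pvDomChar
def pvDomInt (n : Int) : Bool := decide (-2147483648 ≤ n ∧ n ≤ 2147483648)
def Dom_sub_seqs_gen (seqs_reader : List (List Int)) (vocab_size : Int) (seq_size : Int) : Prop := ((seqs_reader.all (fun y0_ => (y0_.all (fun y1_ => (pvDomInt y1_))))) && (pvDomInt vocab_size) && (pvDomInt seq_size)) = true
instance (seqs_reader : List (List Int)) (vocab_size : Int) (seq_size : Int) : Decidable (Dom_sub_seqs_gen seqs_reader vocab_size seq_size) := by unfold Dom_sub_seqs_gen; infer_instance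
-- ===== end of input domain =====

-- B replaces A's per-window all()-rescan by a prefix-sum table of out-of-vocabulary
-- counts built once per sequence (objective: alternative). Equality is about return
-- values (the Python originals are generators; we compare the yielded lists in order).

-- ===== PORT A =====
-- literal port of A: per window, slice and re-scan the whole window with all().
-- the Python assert holds on every input admitted by Pre_ (seq_size ≥ 0); for
-- negative seq_size A raises AssertionError on any nonempty sequence (excluded by Pre_).
def sub_seqs_gen (seqs_reader : List (List Int)) (vocab_size : Int) (seq_size : Int) : List (List Int) :=
  seqs_reader.foldl (fun out seq =>
    if seq_size ≤ (seq.length : Int) then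
      (PySem.List.pyRange 0 ((seq.length : Int) - seq_size + 1) 1).foldl (fun out i =>
        let sub_seq := PySem.List.slice seq (some i) (some (i + seq_size))
        if (sub_seq.map (fun wi => decide (wi < vocab_size))).all (fun b => b) then
          out ++ [sub_seq]
        else out) out
    else out) []

-- ===== PORT B =====
-- literal port of Source B: build pre (prefix counts of out-of-vocabulary words), then
-- window i is valid iff pre[i+seq_size] == pre[i].  pre[-1] is PySem.List.pyGetD pre (-1);
-- pre[i] / pre[i+seq_size] are in range on every input admitted by Pre_, so pyGetD is exact there.
-- the pre-table builder of Source B: pre = [0]; for w in seq: pre.append(pre[-1] + (0 if w < vocab_size else 1))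
def pvPreTable (vocab_size : Int) (seq : List Int) : List Int :=
  seq.foldl
    (fun pre w => pre ++ [PySem.List.pyGetD pre (-1) 0 + (if w < vocab_size then 0 else 1)])
    [0]

def sub_seqs_gen_alt (seqs_reader : List (List Int)) (vocab_size : Int) (seq_size : Int) : List (List Int) :=
  seqs_reader.foldl (fun out seq =>
    if seq_size ≤ (seq.length : Int) then
      let pre : List Int := pvPreTable vocab_size seq
      (PySem.List.pyRange 0 ((seq.length : Int) - seq_size + 1) 1).foldl (fun out i =>
        if PySem.List.pyGetD pre (i + seq_size) 0 = PySem.List.pyGetD pre i 0 then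
          out ++ [PySem.List.slice seq (some i) (some (i + seq_size))]
        else out) out
    else out) []

-- ===== PRECONDITION & SPEC =====
-- Pre_ excludes negative seq_size: there A raises AssertionError on any nonempty
-- sequence (and B raises IndexError); A returns [] only in the degenerate case of an
-- empty seqs_reader, where B also returns [] (see claim cites).
def Pre_sub_seqs_gen (seqs_reader : List (List Int)) (vocab_size : Int) (seq_size : Int) : Prop :=
  0 ≤ seq_size
instance (seqs_reader : List (List Int)) (vocab_size : Int) (seq_size : Int) : Decidable (Pre_sub_seqs_gen seqs_reader vocab_size seq_size) := by unfold Pre_sub_seqs_gen; infer_instance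

def pvWitness_sub_seqs_gen : List (List Int) × Int × Int := ([[1, 5, 2, 0, 3]], 4, 2)

def Spec_sub_seqs_gen (seqs_reader : List (List Int)) (vocab_size : Int) (seq_size : Int) (out : List (List Int)) : Prop := out = sub_seqs_gen_alt seqs_reader vocab_size seq_size
instance (seqs_reader : List (List Int)) (vocab_size : Int) (seq_size : Int) (out : List (List Int)) : Decidable (Spec_sub_seqs_gen seqs_reader vocab_size seq_size out) := by unfold Spec_sub_seqs_gen; infer_instance

-- ===== CLAIM (what is proved, stated in full; the proofs are below) =====
def Claim_equal_sub_seqs_gen : Prop := ∀ (seqs_reader : List (List Int)) (vocab_size : Int) (seq_size : Int), Dom_sub_seqs_gen seqs_reader vocab_size seq_size → Pre_sub_seqs_gen seqs_reader vocab_size seq_size → Spec_sub_seqs_gen seqs_reader vocab_size seq_size (sub_seqs_gen seqs_reader vocab_size seq_size)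

-- ===== LEMMAS AND PROOFS =====

-- the list B's inner foldl builds after the seed value a : running sums a + g w1, a + g w1 + g w2, …
def pvScanAdd (g : Int → Int) (a : Int) : List Int → List Int
  | [] => []
  | w :: ws => (a + g w) :: pvScanAdd g (a + g w) ws

theorem pvBuild (g : Int → Int) :
    ∀ (xs ys : List Int) (a : Int),
      xs.foldl (fun pre w => pre ++ [PySem.List.pyGetD pre (-1) 0 + g w]) (ys ++ [a])
        = (ys ++ [a]) ++ pvScanAdd g a xs := by
  intro xs
  induction xs with
  | nil => intro ys a; simp [pvScanAdd]
  | cons w ws ih =>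
    intro ys a
    simp only [List.foldl_cons, PySem.List.pyGetD_neg_one_append_singleton, pvScanAdd]
    have h := ih (ys ++ [a]) (a + g w)
    simp only [List.append_assoc] at h ⊢
    exact h

theorem pvScanGetD (g : Int → Int) :
    ∀ (xs : List Int) (a : Int) (j : Nat), j ≤ xs.length →
      (a :: pvScanAdd g a xs).getD j 0 = a + ((xs.take j).map g).sum := by
  intro xs
  induction xs with
  | nil =>
    intro a j hj
    have hj0 : j = 0 := Nat.le_zero.mp (by simpa using hj)
    subst hj0; simp [pvScanAdd]
  | cons w ws ih =>
    intro a j hj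
    cases j with
    | zero => simp
    | succ m =>
      simp only [pvScanAdd, List.getD_cons_succ, List.take_succ_cons, List.map_cons,
        List.sum_cons]
      have := ih (a + g w) m (by simpa using hj)
      rw [this]; ring

theorem pvSumZero (v : Int) :
    ∀ (l : List Int),
      ((l.map (fun w => if w < v then (0 : Int) else 1)).sum = 0 ↔ ∀ w ∈ l, w < v) := by
  intro l
  induction l with
  | nil => simp
  | cons w ws ih =>
    have hnn : 0 ≤ ((ws.map (fun w => if w < v then (0 : Int) else 1)).sum) := by
      apply List.sum_nonneg
      intro x hx
      simp only [List.mem_map] at hx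
      obtain ⟨y, _, rfl⟩ := hx
      split_ifs <;> omega
    simp only [List.map_cons, List.sum_cons, List.mem_cons]
    constructor
    · intro h
      by_cases hw : w < v
      · simp only [if_pos hw] at h
        have := ih.mp (by omega)
        intro x hx; rcases hx with rfl | hx
        · exact hw
        · exact this x hx
      · simp only [if_neg hw] at h; omega
    · intro h
      rw [if_pos (h w (Or.inl rfl)), ih.mpr (fun x hx => h x (Or.inr hx))]
      norm_num

-- B's pre-table lookup at a valid index is the prefix count of out-of-vocabulary words
theorem pvPreGetD (vocab_size : Int) (seq : List Int) (j : Nat) (hj : j ≤ seq.length) :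
    PySem.List.pyGetD (pvPreTable vocab_size seq) (j : Int) 0
      = ((seq.take j).map (fun w => if w < vocab_size then (0 : Int) else 1)).sum := by
  unfold pvPreTable
  have hb := pvBuild (fun w => if w < vocab_size then (0 : Int) else 1) seq [] 0
  simp only [List.nil_append] at hb
  rw [hb, PySem.List.pyGetD_natCast]
  have : (0 : Int) :: pvScanAdd (fun w => if w < vocab_size then (0 : Int) else 1) 0 seq
      = [0] ++ pvScanAdd (fun w => if w < vocab_size then (0 : Int) else 1) 0 seq := by simp
  rw [← this, pvScanGetD _ seq 0 j hj]
  ring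

-- the per-window conditions agree: A's all()-scan of the slice equals B's table comparison
theorem pvCond (vocab_size seq_size : Int) (seq : List Int)
    (hk : 0 ≤ seq_size) (i : Int)
    (hi : 0 ≤ i) (hi2 : i < (seq.length : Int) - seq_size + 1) :
    (((PySem.List.slice seq (some i) (some (i + seq_size))).map
        (fun wi => decide (wi < vocab_size))).all (fun b => b) = true)
      ↔ (PySem.List.pyGetD (pvPreTable vocab_size seq) (i + seq_size) 0
        = PySem.List.pyGetD (pvPreTable vocab_size seq) i 0) := by
  obtain ⟨m, rfl⟩ : ∃ m : Nat, i = (m : Int) := ⟨i.toNat, (Int.toNat_of_nonneg hi).symm⟩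
  obtain ⟨k, rfl⟩ : ∃ k : Nat, seq_size = (k : Int) := ⟨seq_size.toNat, (Int.toNat_of_nonneg hk).symm⟩
  have hmk : m + k ≤ seq.length := by omega
  have hslice : PySem.List.slice seq (some (m : Int)) (some ((m : Int) + (k : Int)))
      = (seq.drop m).take k := PySem.List.slice_natCast_add seq m k
  have hsum : ((m : Int) + (k : Int)) = ((m + k : Nat) : Int) := by push_cast; ring
  rw [hslice, hsum, pvPreGetD vocab_size seq (m + k) hmk, pvPreGetD vocab_size seq m (by omega)]
  rw [List.take_add, List.map_append, List.sum_append]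
  have hA : (((seq.drop m).take k).map (fun wi => decide (wi < vocab_size))).all (fun b => b) = true
      ↔ ∀ w ∈ (seq.drop m).take k, w < vocab_size := by
    simp [List.all_eq_true, ← List.map_drop, ← List.map_take]
  rw [hA, ← pvSumZero vocab_size ((seq.drop m).take k)]
  constructor
  · intro h; omega
  · intro h; omega

-- ===== VERDICT (by name: the statement is the Claim_ definition above) =====
theorem sub_seqs_gen_spec : Claim_equal_sub_seqs_gen := by
  intro seqs_reader vocab_size seq_size _ hpre
  unfold Spec_sub_seqs_gen sub_seqs_gen sub_seqs_gen_alt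
  apply PySem.List.foldl_congr_mem
  intro out seq _
  by_cases hlen : seq_size ≤ (seq.length : Int)
  · simp only [if_pos hlen]
    apply PySem.List.foldl_congr_mem
    intro out2 i hi
    rw [PySem.List.mem_pyRange_one] at hi
    exact if_congr (pvCond vocab_size seq_size seq hpre i hi.1 hi.2) rfl rfl
  · simp only [if_neg hlen]
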